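-- pv_equiv track=rewrite | github.com/senel-study/kosmo-3rd | s.yoon/programmers/hash/04music.py | solution
-- ===== SOURCE A (Python) =====
-- from collections import Counter
-- from operator import itemgetter
--
-- def solution(genres, plays):
--     queue = [ [({g:p}),i] for i,(g,p) in enumerate(zip(genres,plays)) ]
--     tmp = Counter()
--     for items in queue:
--         tmp+=Counter(items[0])
--     sorted_gen = sorted(tmp.items(), key=itemgetter(1), reverse=True)
--     best_genre = [x[0] for x in sorted_gen]
--     answer = []
--     for gen in best_genre:
--         loop_queue = queue[:]
--         arr = []
--         # for q in queue:
--         for q in loop_queue: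
--             if gen in q[0]:
--                 arr.append([q[0][gen], q[1]])
--                 queue.remove(q)
--         sorted_arr = sorted(arr, key= lambda x:(-x[0],x[1]))
--         answer += [x[1] for i,x in enumerate(sorted_arr) if i<2]
--     return answer
-- ===== SOURCE B (Python) =====
-- from collections import Counter
--
-- def solution(genres, plays):
--     totals = sum((Counter({g: p}) for g, p in zip(genres, plays)), Counter())
--     groups = {}
--     for i, (g, p) in enumerate(zip(genres, plays)):
--         groups.setdefault(g, []).append((p, i))
--     answer = []
--     for g, _ in sorted(totals.items(), key=lambda kv: kv[1], reverse=True):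
--         answer += [i for _, i in sorted(groups[g], key=lambda t: (-t[0], t[1]))[:2]]
--     return answer
-- ===== Notes on version B (the rewrite author's own statement) =====
-- stated objective: alternative
-- what changed: B computes per-genre totals once as a sum of singleton Counters and groups songs by genre in a single dict pass, then emits the top-2 indices per genre from the sorted groups, instead of A's per-genre rescan of the whole queue with list.remove; not claimed faster (Counter addition is still linear per step).
import Mathlib
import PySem

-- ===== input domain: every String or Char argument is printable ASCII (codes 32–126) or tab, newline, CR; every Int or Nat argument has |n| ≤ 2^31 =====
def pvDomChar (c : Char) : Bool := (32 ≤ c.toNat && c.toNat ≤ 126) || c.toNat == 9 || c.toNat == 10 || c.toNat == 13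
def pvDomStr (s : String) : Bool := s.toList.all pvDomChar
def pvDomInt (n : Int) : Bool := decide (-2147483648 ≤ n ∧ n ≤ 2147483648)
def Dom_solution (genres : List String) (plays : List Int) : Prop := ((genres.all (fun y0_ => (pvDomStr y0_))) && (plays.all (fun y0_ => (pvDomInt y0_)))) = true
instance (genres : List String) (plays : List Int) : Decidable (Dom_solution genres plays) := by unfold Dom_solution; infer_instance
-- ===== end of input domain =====

-- B replaces A's per-genre rescans of the whole song list with queue.remove by one grouping
-- pass over the songs (totals still summed with Counter addition, as in the library idiom);
-- return values proved equal; A's in-place queue mutation is internal to A.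

-- ===== PORT A =====
-- `tmp += Counter(items[0])`: Counter.__iadd__ = update with the other counter, then drop non-positive entries
def counterIAdd (t d : PySem.Dict String Int) : PySem.Dict String Int :=
  PySem.Dict.mk
    ((d.items.foldl (fun (a : PySem.Dict String Int) kv => a.insert kv.1 (a.getD kv.1 0 + kv.2)) t).items.filter
      (fun kv => decide (0 < kv.2)))

def solution (genres : List String) (plays : List Int) : List Int :=
  let queue : List (PySem.Dict String Int × Int) :=
    (PySem.List.enumerate (genres.zip plays) 0).map
      (fun x => (PySem.Dict.insert PySem.Dict.empty x.2.1 x.2.2, x.1))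
  let tmp := queue.foldl (fun t q => counterIAdd t q.1) PySem.Dict.empty
  let sorted_gen := PySem.List.sorted tmp.items (fun kv => kv.2) true
  let best_genre := sorted_gen.map (fun kv => kv.1)
  let res := best_genre.foldl
    (fun (st : List (PySem.Dict String Int × Int) × List Int) gen =>
      -- loop_queue = queue[:]; inner loop appends to arr and removes the matched q from queue
      let inner := st.1.foldl
        (fun (s : List (Int × Int) × List (PySem.Dict String Int × Int)) q =>
          if q.1.contains gen then
            -- q[0][gen] cannot raise here (gen ∈ q[0]); queue.remove(q) cannot raise (q ∈ queue)
            (s.1 ++ [(q.1.getD gen 0, q.2)], (PySem.List.remove? s.2 q).getD s.2)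
          else s)
        ([], st.1)
      let sorted_arr := PySem.List.sorted2 inner.1 (fun x => -x.1) (fun x => x.2)
      (inner.2,
        st.2 ++ ((PySem.List.enumerate sorted_arr 0).filter (fun p => decide (p.1 < 2))).map (fun p => p.2.2)))
    (queue, [])
  res.2

-- ===== PORT B =====
-- Counter.__add__ (used by sum): keep self's positive updated entries, then other's new positive keys
def counterAdd (t d : PySem.Dict String Int) : PySem.Dict String Int :=
  PySem.Dict.mk
    ((t.items.filterMap (fun kv =>
        let n := kv.2 + d.getD kv.1 0
        if 0 < n then some (kv.1, n) else none))
     ++ (d.items.filter (fun kv => !(t.contains kv.1) && decide (0 < kv.2))))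

def solution_alt (genres : List String) (plays : List Int) : List Int :=
  let totals := (genres.zip plays).foldl
    (fun t gp => counterAdd t (PySem.Dict.insert PySem.Dict.empty gp.1 gp.2)) PySem.Dict.empty
  let groups := (PySem.List.enumerate (genres.zip plays) 0).foldl
    (fun (d : PySem.Dict String (List (Int × Int))) x => d.modify x.2.1 [] (fun l => l ++ [(x.2.2, x.1)]))
    PySem.Dict.empty
  (PySem.List.sorted totals.items (fun kv => kv.2) true).foldl
    (fun ans kv =>
      ans ++ ((PySem.List.sorted2 (groups.getD kv.1 []) (fun t => -t.1) (fun t => t.2)).take 2).map (fun t => t.2))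
    []

-- ===== PRECONDITION & SPEC =====
def Spec_solution (genres : List String) (plays : List Int) (out : List Int) : Prop := out = solution_alt genres plays
instance (genres : List String) (plays : List Int) (out : List Int) : Decidable (Spec_solution genres plays out) := by unfold Spec_solution; infer_instance

-- ===== CLAIM (what is proved, stated in full; the proofs are below) =====
def Claim_equal_solution : Prop := ∀ (genres : List String) (plays : List Int), Dom_solution genres plays → Spec_solution genres plays (solution genres plays)

-- ===== LEMMAS AND PROOFS =====

-- helper names for the proofs
def mkQ (x : Int × String × Int) : PySem.Dict String Int × Int :=
  (PySem.Dict.insert PySem.Dict.empty x.2.1 x.2.2, x.1)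

def grp (L : List (Int × String × Int)) (gen : String) : List (Int × Int) :=
  (L.filter (fun x => x.2.1 == gen)).map (fun x => (x.2.2, x.1))

def posD (t : PySem.Dict String Int) : Prop := ∀ kv ∈ t.items, 0 < kv.2

-- the common value of one Counter-addition step with a singleton counter
def charStep (t : PySem.Dict String Int) (g : String) (p : Int) : PySem.Dict String Int :=
  if 0 < t.getD g 0 + p then t.insert g (t.getD g 0 + p)
  else if t.contains g then t.erase g else t

theorem take2 (ys : List (Int × Int)) :
    ((PySem.List.enumerate ys 0).filter (fun p => decide (p.1 < 2))).map (fun p => p.2.2)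
      = (ys.take 2).map (fun t => t.2) := by
  match ys with
  | [] => simp [PySem.List.enumerate_nil]
  | [a] => norm_num [PySem.List.enumerate_cons, PySem.List.enumerate_nil, List.filter_cons]
  | a :: b :: t =>
    rw [PySem.List.enumerate_cons, PySem.List.enumerate_cons]
    norm_num [List.filter_cons]
    intro i p q hmem
    rcases (PySem.List.mem_enumerate_iff _ _ _).1 hmem with ⟨k, hk, heq⟩
    have : i = 2 + (k : Int) := congrArg Prod.fst heq
    omega

theorem map_replace_filter (c : Int) (g : String) (hc : ¬ 0 < c) :
    ∀ (l : List (String × Int)), (∀ kv ∈ l, 0 < kv.2) →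
      (l.map (fun p => if (p.1 == g) = true then (g, c) else p)).filter (fun kv => decide (0 < kv.2))
        = l.filter (fun p => !(p.1 == g)) := by
  intro l
  induction l with
  | nil => simp
  | cons a t ih =>
    intro h
    have hpos := h a (List.mem_cons_self ..)
    have ht := ih (fun kv hkv => h kv (List.mem_cons_of_mem _ hkv))
    rw [List.map_cons, List.filter_cons, List.filter_cons, ht]
    by_cases hg : (a.1 == g) = true
    · simp [hg, hc]
    · simp [hg, hpos]

theorem counter_step (t : PySem.Dict String Int) (hpos : posD t) (g : String) (p : Int) :
    counterIAdd t (PySem.Dict.insert PySem.Dict.empty g p) = charStep t g p := by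
  have hstep : counterIAdd t (PySem.Dict.insert PySem.Dict.empty g p)
      = PySem.Dict.mk ((t.insert g (t.getD g 0 + p)).items.filter (fun kv => decide (0 < kv.2))) := rfl
  rw [hstep, charStep]
  set c := t.getD g 0 + p with hc
  by_cases h : 0 < c
  · rw [if_pos h]
    have hfil : (t.insert g c).items.filter (fun kv => decide (0 < kv.2)) = (t.insert g c).items := by
      apply List.filter_eq_self.mpr
      intro kv hkv
      rcases (PySem.Dict.mem_items_insert t g c kv).1 hkv with h1 | h2
      · subst h1; simpa using h
      · simpa using hpos kv h2.1
    rw [hfil]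
  · rw [if_neg h]
    by_cases hcont : t.contains g = true
    · rw [if_pos hcont, PySem.Dict.items_insert_of_contains t c hcont]
      have := map_replace_filter c g h t.items hpos
      show PySem.Dict.mk _ = t.erase g
      rw [this]
      rfl
    · rw [if_neg hcont, PySem.Dict.items_insert_of_not_contains t c (by simpa using hcont)]
      rw [List.filter_append]
      have h1 : t.items.filter (fun kv => decide (0 < kv.2)) = t.items :=
        List.filter_eq_self.mpr (fun kv hkv => by simpa using hpos kv hkv)
      have h2 : [(g, c)].filter (fun kv : String × Int => decide (0 < kv.2)) = [] := by
        simp [h]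
      rw [h1, h2, List.append_nil]

theorem counter_step_pos (t : PySem.Dict String Int) (hpos : posD t) (g : String) (p : Int) :
    posD (charStep t g p) := by
  rw [charStep]
  by_cases h : 0 < t.getD g 0 + p
  · rw [if_pos h]
    intro kv hkv
    rcases (PySem.Dict.mem_items_insert t g _ kv).1 hkv with h1 | h2
    · subst h1; simpa using h
    · exact hpos kv h2.1
  · rw [if_neg h]
    by_cases hcont : t.contains g = true
    · rw [if_pos hcont]
      intro kv hkv
      exact hpos kv (List.mem_of_mem_filter hkv)
    · rw [if_neg hcont]; exact hpos

theorem counter_step_nodup (t : PySem.Dict String Int) (h : t.keys.Nodup) (g : String) (p : Int) :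
    (charStep t g p).keys.Nodup := by
  rw [charStep]
  by_cases hp : 0 < t.getD g 0 + p
  · rw [if_pos hp]
    exact PySem.Dict.nodup_keys_insert t g _ h
  · rw [if_neg hp]
    by_cases hcont : t.contains g = true
    · rw [if_pos hcont]
      exact List.Nodup.sublist (List.Sublist.map _ List.filter_sublist) h
    · rw [if_neg hcont]; exact h

-- one entry of the filterMap pass of Counter.__add__ against a singleton {g: p}
def addEntry (g : String) (p : Int) (kv : String × Int) : Option (String × Int) :=
  if 0 < kv.2 + (if kv.1 = g then p else 0) then some (kv.1, kv.2 + (if kv.1 = g then p else 0)) else none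

-- the filterMap pass of __add__ over an all-positive list whose only g-entry (if any) holds value v
theorem filterMap_add_replace (g : String) (p v : Int) :
    ∀ (l : List (String × Int)), (∀ kv ∈ l, 0 < kv.2) → (∀ kv ∈ l, kv.1 = g → kv.2 = v) →
      l.filterMap (addEntry g p)
        = (l.map (fun kv => if (kv.1 == g) = true then (g, v + p) else kv)).filter
            (fun kv => decide (0 < kv.2)) := by
  intro l
  induction l with
  | nil => intro _ _; rfl
  | cons a l ih =>
    intro hpos hval
    have hpa := hpos a (List.mem_cons_self ..)
    have ihl := ih (fun kv hkv => hpos kv (List.mem_cons_of_mem _ hkv))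
      (fun kv hkv hg => hval kv (List.mem_cons_of_mem _ hkv) hg)
    rw [List.filterMap_cons, List.map_cons, List.filter_cons, ihl]
    by_cases hg' : a.1 = g
    · have hva : a.2 = v := hval a (List.mem_cons_self ..) hg'
      have hhead : addEntry g p a = if 0 < v + p then some (g, v + p) else none := by
        simp [addEntry, hg', hva]
      rw [hhead]
      by_cases hc : 0 < v + p
      · simp [hc, hg']
      · simp [hc, hg']
    · have hhead : addEntry g p a = some a := by
        simp [addEntry, hg', hpa]
      rw [hhead]
      simp [hg', hpa]

-- the filterMap pass of __add__ is the identity when no entry carries the new key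
theorem filterMap_add_fresh (g : String) (p : Int) :
    ∀ (l : List (String × Int)), (∀ kv ∈ l, 0 < kv.2) → (∀ kv ∈ l, kv.1 ≠ g) →
      l.filterMap (addEntry g p) = l := by
  intro l
  induction l with
  | nil => intro _ _; rfl
  | cons a l ih =>
    intro hpos hne
    have hpa := hpos a (List.mem_cons_self ..)
    have hna := hne a (List.mem_cons_self ..)
    have hhead : addEntry g p a = some a := by
      simp [addEntry, hna, hpa]
    rw [List.filterMap_cons, hhead,
      ih (fun kv hkv => hpos kv (List.mem_cons_of_mem _ hkv))
         (fun kv hkv => hne kv (List.mem_cons_of_mem _ hkv))]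

-- B's __add__ with a singleton counter agrees with A's __iadd__ step on positive nodup-key counters
theorem counterAdd_eq_counterIAdd (t : PySem.Dict String Int) (hpos : posD t)
    (hnd : t.keys.Nodup) (g : String) (p : Int) :
    counterAdd t (PySem.Dict.insert PySem.Dict.empty g p)
      = counterIAdd t (PySem.Dict.insert PySem.Dict.empty g p) := by
  have hitems : (PySem.Dict.insert PySem.Dict.empty g p).items = [(g, p)] := by
    rw [PySem.Dict.items_insert_of_not_contains _ _ (by simp)]
    simp [PySem.Dict.empty]
  have hfun : t.items.filterMap (fun kv =>
        let n := kv.2 + (PySem.Dict.insert PySem.Dict.empty g p).getD kv.1 0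
        if 0 < n then some (kv.1, n) else none)
      = t.items.filterMap (addEntry g p) := by
    apply List.filterMap_congr
    intro kv _
    simp [addEntry, PySem.Dict.getD_insert, PySem.Dict.getD_empty]
  have hLHS : counterAdd t (PySem.Dict.insert PySem.Dict.empty g p)
      = PySem.Dict.mk
          ((t.items.filterMap (addEntry g p))
           ++ ([(g, p)].filter (fun kv => !(t.contains kv.1) && decide (0 < kv.2)))) := by
    rw [counterAdd, hitems, hfun]
  have hRHS : counterIAdd t (PySem.Dict.insert PySem.Dict.empty g p)
      = PySem.Dict.mk ((t.insert g (t.getD g 0 + p)).items.filter (fun kv => decide (0 < kv.2))) := by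
    rw [counterIAdd, hitems]
    rfl
  rw [hLHS, hRHS]
  by_cases hcont : t.contains g = true
  · -- g present in t: the appended part is empty and filterMap is the replaced-filtered list
    have happ : [(g, p)].filter (fun kv : String × Int => !(t.contains kv.1) && decide (0 < kv.2)) = [] := by
      simp [hcont]
    have hval : ∀ kv ∈ t.items, kv.1 = g → kv.2 = t.getD g 0 := by
      intro kv hkv hg
      have hmem : (g, kv.2) ∈ t.items := by
        have he : kv = (g, kv.2) := by rw [← hg]
        rwa [he] at hkv
      exact (PySem.Dict.getD_of_mem_items t hmem hnd 0).symm
    rw [happ, List.append_nil, PySem.Dict.items_insert_of_contains t _ hcont,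
      filterMap_add_replace g p (t.getD g 0) t.items hpos hval]
  · -- g fresh: filterMap is the identity and the new key is appended iff positive
    have hcf : t.contains g = false := by simpa using hcont
    have hne : ∀ kv ∈ t.items, kv.1 ≠ g := by
      intro kv hkv hg
      apply Bool.eq_false_iff.mp hcf
      exact (PySem.Dict.contains_iff_mem_keys t g).mpr (hg ▸ List.mem_map_of_mem hkv)
    have hc : t.getD g 0 + p = p := by
      rw [PySem.Dict.getD_of_not_contains t 0 hcf]
      omega
    have h1 : t.items.filter (fun kv => decide (0 < kv.2)) = t.items :=
      List.filter_eq_self.mpr (fun kv hkv => by simpa using hpos kv hkv)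
    rw [PySem.Dict.items_insert_of_not_contains t _ hcf, List.filter_append,
      filterMap_add_fresh g p t.items hpos hne, h1, hc]
    congr 2
    simp [List.filter_cons, hcf]

theorem totals_fold : ∀ (l : List (String × Int)) (t : PySem.Dict String Int), posD t →
    l.foldl (fun t gp => counterIAdd t (PySem.Dict.insert PySem.Dict.empty gp.1 gp.2)) t
      = l.foldl (fun t gp => charStep t gp.1 gp.2) t := by
  intro l
  induction l with
  | nil => intro t _; rfl
  | cons x l ih =>
    intro t hpos
    simp only [List.foldl_cons]
    rw [counter_step t hpos x.1 x.2]
    exact ih _ (counter_step_pos t hpos x.1 x.2)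

theorem totals_eq : ∀ (l : List (String × Int)) (t : PySem.Dict String Int),
    posD t → t.keys.Nodup →
    l.foldl (fun t gp => counterAdd t (PySem.Dict.insert PySem.Dict.empty gp.1 gp.2)) t
      = l.foldl (fun t gp => counterIAdd t (PySem.Dict.insert PySem.Dict.empty gp.1 gp.2)) t := by
  intro l
  induction l with
  | nil => intro t _ _; rfl
  | cons x l ih =>
    intro t hpos hnd
    simp only [List.foldl_cons]
    rw [counterAdd_eq_counterIAdd t hpos hnd x.1 x.2, counter_step t hpos x.1 x.2,
      ← counter_step t hpos x.1 x.2]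
    have h1 : counterIAdd t (PySem.Dict.insert PySem.Dict.empty x.1 x.2) = charStep t x.1 x.2 :=
      counter_step t hpos x.1 x.2
    rw [h1]
    exact ih _ (counter_step_pos t hpos x.1 x.2) (counter_step_nodup t hnd x.1 x.2)

theorem totals_nodup : ∀ (l : List (String × Int)) (t : PySem.Dict String Int), t.keys.Nodup →
    (l.foldl (fun t gp => charStep t gp.1 gp.2) t).keys.Nodup := by
  intro l
  induction l with
  | nil => intro t h; exact h
  | cons x l ih =>
    intro t h
    simp only [List.foldl_cons]
    exact ih _ (counter_step_nodup t h x.1 x.2)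

theorem beq_QE : ∀ (a b : PySem.Dict String Int × Int), (a == b) = true ↔ a = b := by
  intro a b
  obtain ⟨⟨la⟩, ia⟩ := a; obtain ⟨⟨lb⟩, ib⟩ := b
  have h : ((⟨⟨la⟩, ia⟩ : PySem.Dict String Int × Int) == ⟨⟨lb⟩, ib⟩) = ((la == lb) && (ia == ib)) := rfl
  rw [h]
  simp [Prod.ext_iff, PySem.Dict.ext_iff]

-- first-occurrence removal of e from l1 ++ e :: l2 when e ∉ l1 (derived BEq on Dict has no
-- registered LawfulBEq instance, so this takes the beq↔eq fact as a hypothesis)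
theorem remove?_ac {α : Type} [BEq α] (hbeq : ∀ x y : α, (x == y) = true ↔ x = y)
    (l2 : List α) (e : α) : ∀ l1 : List α, e ∉ l1 →
      PySem.List.remove? (l1 ++ e :: l2) e = some (l1 ++ l2) := by
  intro l1
  induction l1 with
  | nil =>
    intro _
    show (List.idxOf? e (e :: l2)).map _ = _
    rw [List.idxOf?, List.findIdx?_cons]
    simp [(hbeq e e).mpr rfl]
  | cons a l1 ih =>
    intro he
    have hne : (a == e) = false := by
      rw [Bool.eq_false_iff]
      intro hh
      exact he ((hbeq a e).mp hh ▸ List.mem_cons_self ..)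
    have ht := ih (fun hh => he (List.mem_cons_of_mem _ hh))
    show (List.idxOf? e ((a :: l1) ++ e :: l2)).map _ = _
    rw [List.cons_append, List.idxOf?, List.findIdx?_cons, hne]
    simp only [Bool.false_eq_true, if_false]
    obtain ⟨k, hk, hk2⟩ : ∃ k, List.idxOf? e (l1 ++ e :: l2) = some k ∧ (l1 ++ e :: l2).eraseIdx k = l1 ++ l2 := by
      rcases hfind : List.idxOf? e (l1 ++ e :: l2) with _ | k
      · simp [PySem.List.remove?, hfind] at ht
      · refine ⟨k, rfl, ?_⟩
        simpa [PySem.List.remove?, hfind] using ht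
    rw [List.idxOf?] at hk
    rw [hk]
    simp [List.eraseIdx_cons_succ, hk2]

theorem remove?_append_cons (l2 : List (PySem.Dict String Int × Int)) (e : PySem.Dict String Int × Int) :
    ∀ (l1 : List (PySem.Dict String Int × Int)), e ∉ l1 →
      PySem.List.remove? (l1 ++ e :: l2) e = some (l1 ++ l2) := by
  exact remove?_ac beq_QE l2 e

theorem inner_loop (gen : String) :
    ∀ (S pre : List (PySem.Dict String Int × Int)) (arr : List (Int × Int)),
      (pre ++ S).Nodup →
      S.foldl (fun s q => if q.1.contains gen
            then (s.1 ++ [(q.1.getD gen 0, q.2)], (PySem.List.remove? s.2 q).getD s.2)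
            else s) (arr, pre ++ S)
        = (arr ++ (S.filter (fun q => q.1.contains gen)).map (fun q => (q.1.getD gen 0, q.2)),
           pre ++ S.filter (fun q => !(q.1.contains gen))) := by
  intro S
  induction S with
  | nil => intro pre arr _; simp
  | cons q S ih =>
    intro pre arr hnd
    simp only [List.foldl_cons]
    by_cases hm : q.1.contains gen = true
    · rw [if_pos hm]
      have hq : q ∉ pre := by
        rcases List.nodup_append.mp hnd with ⟨_, _, hdisj⟩
        exact fun hc => hdisj q hc q List.mem_cons_self rfl
      rw [remove?_append_cons S q pre hq]
      simp only [Option.getD_some]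
      have hnd' : (pre ++ S).Nodup :=
        ((List.append_sublist_append_left pre).2 (List.sublist_cons_self q S)).nodup hnd
      rw [ih pre (arr ++ [(q.1.getD gen 0, q.2)]) hnd']
      simp [hm, List.append_assoc]
    · rw [if_neg hm]
      have hsplit : pre ++ q :: S = (pre ++ [q]) ++ S := by simp
      rw [hsplit] at hnd
      rw [hsplit, ih (pre ++ [q]) arr hnd]
      simp [hm]

theorem outer_loop (L : List (Int × String × Int)) (hL : (L.map (fun x => x.1)).Nodup) :
    ∀ (sg : List (String × Int)) (φ : Int × String × Int → Bool) (ans : List Int),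
      (sg.map (fun kv => kv.1)).Nodup →
      (∀ x ∈ L, x.2.1 ∈ sg.map (fun kv => kv.1) → φ x = true) →
      (sg.foldl (fun (st : List (PySem.Dict String Int × Int) × List Int) kv =>
          let inner := st.1.foldl (fun s q => if q.1.contains kv.1
                then (s.1 ++ [(q.1.getD kv.1 0, q.2)], (PySem.List.remove? s.2 q).getD s.2)
                else s) ([], st.1)
          let sorted_arr := PySem.List.sorted2 inner.1 (fun x => -x.1) (fun x => x.2)
          (inner.2, st.2 ++ ((PySem.List.enumerate sorted_arr 0).filter (fun p => decide (p.1 < 2))).map (fun p => p.2.2)))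
        ((L.filter φ).map mkQ, ans)).2
      = sg.foldl (fun ans kv =>
          ans ++ ((PySem.List.sorted2 (grp L kv.1) (fun t => -t.1) (fun t => t.2)).take 2).map (fun t => t.2)) ans := by
  intro sg
  induction sg with
  | nil => intro φ ans _ _; rfl
  | cons kv sg ih =>
    intro φ ans hnd hφ
    have hkv_notin : kv.1 ∉ sg.map (fun kv => kv.1) := by
      rw [List.map_cons] at hnd
      exact (List.nodup_cons.mp hnd).1
    have hnd' : (sg.map (fun kv => kv.1)).Nodup := by
      rw [List.map_cons] at hnd
      exact (List.nodup_cons.mp hnd).2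
    have hQnd : (((L.filter φ).map mkQ)).Nodup := by
      apply List.Nodup.of_map (f := fun q : PySem.Dict String Int × Int => q.2)
      have : (((L.filter φ).map mkQ).map (fun q => q.2)) = (L.filter φ).map (fun x => x.1) := by
        rw [List.map_map]; rfl
      rw [this]
      exact (List.Sublist.map _ List.filter_sublist).nodup hL
    have hinner := inner_loop kv.1 ((L.filter φ).map mkQ) [] []
      (by simpa using hQnd)
    simp only [List.nil_append] at hinner
    -- the matched elements are exactly the kv.1-genre songs, still all present
    have harr : (((L.filter φ).map mkQ).filter (fun q => q.1.contains kv.1)).map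
        (fun q => (q.1.getD kv.1 0, q.2)) = grp L kv.1 := by
      rw [List.filter_map, List.map_map]
      have hpred : ∀ x ∈ L.filter φ,
          ((fun q : PySem.Dict String Int × Int => q.1.contains kv.1) ∘ mkQ) x = (x.2.1 == kv.1) := by
        intro x _
        show (PySem.Dict.insert PySem.Dict.empty x.2.1 x.2.2).contains kv.1 = (x.2.1 == kv.1)
        rw [PySem.Dict.contains_insert]
        simp [Bool.beq_comm]
      rw [List.filter_congr hpred, List.filter_filter]
      have hps : ∀ x ∈ L, ((x.2.1 == kv.1) && φ x) = (x.2.1 == kv.1) := by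
        intro x hx
        by_cases hg : (x.2.1 == kv.1) = true
        · have : φ x = true := hφ x hx (by rw [List.map_cons]; exact (by simpa using hg : x.2.1 = kv.1) ▸ List.mem_cons_self)
          simp [hg, this]
        · simp [Bool.eq_false_iff.mpr hg]
      rw [List.filter_congr hps]
      apply List.map_congr_left
      intro x hx
      have hg : x.2.1 = kv.1 := by simpa using (List.mem_filter.mp hx).2
      show ((PySem.Dict.insert PySem.Dict.empty x.2.1 x.2.2).getD kv.1 0, x.1) = (x.2.2, x.1)
      rw [← hg, PySem.Dict.getD_insert_self]
    have hQ' : ((L.filter φ).map mkQ).filter (fun q => !(q.1.contains kv.1))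
        = (L.filter (fun x => !(x.2.1 == kv.1) && φ x)).map mkQ := by
      rw [List.filter_map]
      have hpred : ∀ x ∈ L.filter φ,
          ((fun q : PySem.Dict String Int × Int => !(q.1.contains kv.1)) ∘ mkQ) x = (!(x.2.1 == kv.1)) := by
        intro x _
        show (!(PySem.Dict.insert PySem.Dict.empty x.2.1 x.2.2).contains kv.1) = (!(x.2.1 == kv.1))
        rw [PySem.Dict.contains_insert]
        simp [Bool.beq_comm]
      rw [List.filter_congr hpred, List.filter_filter]
    simp only [List.foldl_cons]
    rw [hinner, harr, hQ', take2]
    rw [ih (fun x => !(x.2.1 == kv.1) && φ x) _ hnd' ?_]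
    intro x hx hmem
    have h1 : φ x = true := hφ x hx (by rw [List.map_cons]; exact List.mem_cons_of_mem _ hmem)
    have h2 : x.2.1 ≠ kv.1 := fun hh => hkv_notin (hh ▸ hmem)
    simp [h1, h2]

-- a fold over enumerate that ignores the index is a fold over the list
theorem foldl_enumerate_snd {α β : Type} (F : β → α → β) :
    ∀ (L : List α) (s : Int) (t : β),
      (PySem.List.enumerate L s).foldl (fun t x => F t x.2) t = L.foldl F t := by
  intro L
  induction L with
  | nil => intro s t; rfl
  | cons a L ih =>
    intro s t
    rw [PySem.List.enumerate_cons, List.foldl_cons, List.foldl_cons, ih]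

theorem solution_spec' (genres : List String) (plays : List Int) :
    solution genres plays = solution_alt genres plays := by
  have hLnd : (((PySem.List.enumerate (genres.zip plays) 0)).map (fun x => x.1)).Nodup := by
    rw [PySem.List.map_fst_enumerate]
    exact PySem.List.nodup_pyRange_one _ _
  have hposE : posD PySem.Dict.empty := by intro kv h; simp [PySem.Dict.empty] at h
  set L := PySem.List.enumerate (genres.zip plays) 0 with hLdef
  set Z := genres.zip plays with hZdef
  -- A's queue-wise Counter addition is the pair-wise iadd fold over the songs
  have htotA : (L.map mkQ).foldl (fun t q => counterIAdd t q.1) PySem.Dict.empty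
      = Z.foldl (fun t gp => counterIAdd t (PySem.Dict.insert PySem.Dict.empty gp.1 gp.2))
          PySem.Dict.empty := by
    rw [List.foldl_map]
    exact foldl_enumerate_snd
      (fun t gp => counterIAdd t (PySem.Dict.insert PySem.Dict.empty gp.1 gp.2)) Z 0 PySem.Dict.empty
  -- B's sum of singleton Counters computes the same totals
  have htotB : Z.foldl (fun t gp => counterAdd t (PySem.Dict.insert PySem.Dict.empty gp.1 gp.2))
        PySem.Dict.empty
      = Z.foldl (fun t gp => counterIAdd t (PySem.Dict.insert PySem.Dict.empty gp.1 gp.2))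
          PySem.Dict.empty :=
    totals_eq Z PySem.Dict.empty hposE PySem.Dict.nodup_keys_empty
  -- B's groups dict holds exactly the per-genre song lists
  have hgrp : ∀ gen, (L.foldl (fun d x => d.modify x.2.1 [] (fun l => l ++ [(x.2.2, x.1)])) PySem.Dict.empty).getD gen []
      = grp L gen := by
    intro gen
    have hmap : (L.map (fun x => (x.2.1, (x.2.2, x.1)))).foldl
        (fun d p => d.modify p.1 [] (fun l => l ++ [p.2])) PySem.Dict.empty
        = L.foldl (fun d x => d.modify x.2.1 [] (fun l => l ++ [(x.2.2, x.1)])) PySem.Dict.empty :=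
      List.foldl_map
    rw [← hmap, PySem.Dict.getD_foldl_modify_append, PySem.Dict.getD_empty, List.nil_append]
    rw [List.filter_map, List.map_map]
    rfl
  set Bt := Z.foldl (fun t gp => counterIAdd t (PySem.Dict.insert PySem.Dict.empty gp.1 gp.2))
      PySem.Dict.empty with hBt
  set Bg := L.foldl (fun d x => d.modify x.2.1 [] (fun l => l ++ [(x.2.2, x.1)])) PySem.Dict.empty with hBg
  have hsgnd : ((PySem.List.sorted Bt.items (fun kv => kv.2) true).map (fun kv => kv.1)).Nodup := by
    have hperm : ((PySem.List.sorted Bt.items (fun kv => kv.2) true).map (fun kv => kv.1)).Perm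
        (Bt.items.map (fun kv => kv.1)) := (PySem.List.sorted_perm Bt.items _ true).map _
    have hkeys : (Bt.items.map (fun kv => kv.1)).Nodup := by
      rw [hBt, totals_fold Z PySem.Dict.empty hposE]
      exact totals_nodup Z PySem.Dict.empty PySem.Dict.nodup_keys_empty
    exact hperm.symm.nodup hkeys
  have ho := outer_loop L hLnd (PySem.List.sorted Bt.items (fun kv => kv.2) true) (fun _ => true) []
    hsgnd (by intro x hx _; rfl)
  rw [List.filter_true] at ho
  -- name both programs' result shape and chain the rewrites
  show (((PySem.List.sorted ((L.map mkQ).foldl (fun t q => counterIAdd t q.1) PySem.Dict.empty).items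
        (fun kv => kv.2) true).map (fun kv => kv.1)).foldl
      (fun (st : List (PySem.Dict String Int × Int) × List Int) gen =>
        let inner := st.1.foldl (fun s q => if q.1.contains gen
              then (s.1 ++ [(q.1.getD gen 0, q.2)], (PySem.List.remove? s.2 q).getD s.2)
              else s) ([], st.1)
        let sorted_arr := PySem.List.sorted2 inner.1 (fun x => -x.1) (fun x => x.2)
        (inner.2, st.2 ++ ((PySem.List.enumerate sorted_arr 0).filter (fun p => decide (p.1 < 2))).map (fun p => p.2.2)))
      (L.map mkQ, ([] : List Int))).2
    = (PySem.List.sorted (Z.foldl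
          (fun t gp => counterAdd t (PySem.Dict.insert PySem.Dict.empty gp.1 gp.2))
          PySem.Dict.empty).items (fun kv => kv.2) true).foldl
        (fun ans kv =>
          ans ++ ((PySem.List.sorted2 (Bg.getD kv.1 []) (fun t => -t.1) (fun t => t.2)).take 2).map (fun t => t.2)) []
  rw [htotA, htotB, List.foldl_map]
  refine ho.trans ?_
  apply PySem.List.foldl_congr_mem
  intro acc kv _
  rw [hgrp kv.1]

-- ===== VERDICT (by name: the statement is the Claim_ definition above) =====
theorem solution_spec : Claim_equal_solution := by
  intro genres plays _
  exact solution_spec' genres plays
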